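-- pv_equiv track=rewrite | github.com/Metalbenji/supoclip | backend/src/video_utils.py | _apply_letter_spacing
-- ===== SOURCE A (Python) =====
-- def _apply_letter_spacing(text: str, spacing: int) -> str:
--     if spacing <= 0:
--         return text
--     joiner = " " * spacing
--     spaced_words = []
--     for word in text.split(" "):
--         if len(word) <= 1:
--             spaced_words.append(word)
--         else:
--             spaced_words.append(joiner.join(list(word)))
--     return " ".join(spaced_words)
-- ===== SOURCE B (Python) =====
-- def _apply_letter_spacing(text: str, spacing: int) -> str:
--     if spacing <= 0:
--         return text
--     joiner = " " * spacing
--     out = []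
--     for i, ch in enumerate(text):
--         out.append(ch)
--         if i + 1 < len(text) and ch != " " and text[i + 1] != " ":
--             out.append(joiner)
--     return "".join(out)
-- ===== Notes on version B (the rewrite author's own statement) =====
-- stated objective: alternative
-- what changed: Replaces the split-on-space / per-word character-join / rejoin pipeline with a single left-to-right scan that emits each character and inserts the joiner between every pair of adjacent non-space characters.
import Mathlib
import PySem

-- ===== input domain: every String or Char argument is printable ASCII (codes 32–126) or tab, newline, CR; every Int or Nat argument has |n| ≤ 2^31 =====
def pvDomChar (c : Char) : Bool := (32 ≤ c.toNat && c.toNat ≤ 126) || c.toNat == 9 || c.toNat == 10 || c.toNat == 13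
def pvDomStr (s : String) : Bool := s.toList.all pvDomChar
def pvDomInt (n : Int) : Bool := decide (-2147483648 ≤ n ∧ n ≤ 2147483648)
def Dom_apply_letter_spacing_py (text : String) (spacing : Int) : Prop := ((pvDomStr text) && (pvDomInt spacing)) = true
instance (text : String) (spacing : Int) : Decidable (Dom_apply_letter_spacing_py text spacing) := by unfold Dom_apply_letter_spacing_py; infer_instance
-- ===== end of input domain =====

-- B replaces A's split-into-words / per-word join / rejoin pipeline with one scan that
-- inserts the joiner between adjacent non-space characters (objective: alternative).

-- ===== PORT A =====
-- hand port of text.split(" ") (single-space separator, no maxsplit): exact — "".split(" ") = [""],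
-- consecutive separators yield empty words
def pySplitSpace : List Char → List (List Char)
  | [] => [[]]
  | c :: cs =>
    if c = ' ' then [] :: pySplitSpace cs
    else
      match pySplitSpace cs with
      | w :: ws => (c :: w) :: ws
      | [] => [[c]]   -- unreachable: pySplitSpace never returns []

-- hand port of sep.join(parts): exact — empty list gives "", no trailing separator
def pyJoin (sep : List Char) : List (List Char) → List Char
  | [] => []
  | [w] => w
  | w :: ws => w ++ sep ++ pyJoin sep ws

def apply_letter_spacing_py (text : String) (spacing : Int) : String :=
  if spacing ≤ 0 then text
  else
    let joiner := List.replicate spacing.toNat ' '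
    let spaced_words := (pySplitSpace text.toList).foldl
      (fun acc word =>
        acc ++ [if word.length ≤ 1 then word
                else pyJoin joiner (word.map (fun c => [c]))]) []
    String.ofList (pyJoin [' '] spaced_words)

-- ===== PORT B =====
-- B's loop: emit the character, then the joiner iff a next character exists and both are non-space
def bGo (j : List Char) : List Char → List Char
  | [] => []
  | c :: rest =>
    let extra : List Char :=
      match rest with
      | d :: _ => if c ≠ ' ' ∧ d ≠ ' ' then j else []
      | [] => []
    c :: (extra ++ bGo j rest)

def apply_letter_spacing_py_alt (text : String) (spacing : Int) : String :=
  if spacing ≤ 0 then text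
  else String.ofList (bGo (List.replicate spacing.toNat ' ') text.toList)

-- ===== PRECONDITION & SPEC =====
def Spec_apply_letter_spacing_py (text : String) (spacing : Int) (out : String) : Prop := out = apply_letter_spacing_py_alt text spacing
instance (text : String) (spacing : Int) (out : String) : Decidable (Spec_apply_letter_spacing_py text spacing out) := by unfold Spec_apply_letter_spacing_py; infer_instance

-- ===== CLAIM (what is proved, stated in full; the proofs are below) =====
def Claim_equal_apply_letter_spacing_py : Prop := ∀ (text : String) (spacing : Int), Dom_apply_letter_spacing_py text spacing → Spec_apply_letter_spacing_py text spacing (apply_letter_spacing_py text spacing)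

-- ===== LEMMAS AND PROOFS =====

-- A's per-word body, as a function
def spacedW (j : List Char) (w : List Char) : List Char :=
  if w.length ≤ 1 then w else pyJoin j (w.map (fun c => [c]))

theorem pySplitSpace_ne_nil (cs : List Char) : pySplitSpace cs ≠ [] := by
  induction cs with
  | nil => simp [pySplitSpace]
  | cons c cs ih =>
    simp only [pySplitSpace]
    split
    · simp
    · cases h : pySplitSpace cs with
      | nil => simp
      | cons w ws => simp

theorem spacedW_eq_join (j : List Char) (w : List Char) :
    spacedW j w = pyJoin j (w.map (fun c => [c])) := by
  match w with
  | [] => simp [spacedW, pyJoin]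
  | [c] => simp [spacedW, pyJoin]
  | c :: d :: t => simp [spacedW]

theorem join_map_cons (j : List Char) (c : Char) (w : List Char) (hw : w ≠ []) :
    pyJoin j ((c :: w).map (fun c => [c])) = c :: (j ++ pyJoin j (w.map (fun c => [c]))) := by
  cases w with
  | nil => exact absurd rfl hw
  | cons d t => simp [pyJoin]

theorem pyJoin_cons_append (sep a b : List Char) (l : List (List Char)) :
    pyJoin sep ((a ++ b) :: l) = a ++ pyJoin sep (b :: l) := by
  cases l with
  | nil => simp [pyJoin]
  | cons w ws => simp [pyJoin]

theorem foldl_append_map (f : List Char → List Char) (l : List (List Char)) (acc : List (List Char)) :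
    l.foldl (fun acc word => acc ++ [f word]) acc = acc ++ l.map f := by
  induction l generalizing acc with
  | nil => simp
  | cons w ws ih => simp [List.foldl, ih]

theorem main_lemma (j : List Char) (cs : List Char) :
    pyJoin [' '] ((pySplitSpace cs).map (spacedW j)) = bGo j cs := by
  induction cs with
  | nil => simp [pySplitSpace, spacedW, pyJoin, bGo]
  | cons c cs ih =>
    by_cases hc : c = ' '
    · subst hc
      obtain ⟨w, ws, hw⟩ : ∃ w ws, pySplitSpace cs = w :: ws := by
        cases h : pySplitSpace cs with
        | nil => exact absurd h (pySplitSpace_ne_nil cs)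
        | cons w ws => exact ⟨w, ws, rfl⟩
      have hsplit : pySplitSpace (' ' :: cs) = [] :: w :: ws := by
        simp [pySplitSpace, hw]
      rw [hw] at ih
      rw [hsplit]
      have hnil : spacedW j [] = [] := by simp [spacedW]
      simp only [List.map_cons, hnil]
      have hL : pyJoin [' '] ([] :: spacedW j w :: ws.map (spacedW j))
          = ' ' :: pyJoin [' '] (spacedW j w :: ws.map (spacedW j)) := by
        simp [pyJoin]
      rw [hL]
      simp only [List.map_cons] at ih
      rw [ih]
      cases cs with
      | nil => simp [bGo]
      | cons d t => simp [bGo]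
    · cases cs with
      | nil =>
        simp [pySplitSpace, hc, spacedW, pyJoin, bGo]
      | cons d t =>
        by_cases hd : d = ' '
        · subst hd
          have hsplit : pySplitSpace (' ' :: t) = [] :: pySplitSpace t := by
            simp [pySplitSpace]
          have hsplit2 : pySplitSpace (c :: ' ' :: t) = [c] :: pySplitSpace t := by
            simp [pySplitSpace, hc]
          obtain ⟨w, ws, hw⟩ : ∃ w ws, pySplitSpace t = w :: ws := by
            cases h : pySplitSpace t with
            | nil => exact absurd h (pySplitSpace_ne_nil t)
            | cons w ws => exact ⟨w, ws, rfl⟩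
          rw [hsplit, hw] at ih
          rw [hsplit2, hw]
          have e1 : pyJoin [' '] (([c] :: w :: ws).map (spacedW j))
              = c :: ' ' :: pyJoin [' '] ((w :: ws).map (spacedW j)) := by
            simp [pyJoin, spacedW]
          have e2 : pyJoin [' '] ((([] : List Char) :: w :: ws).map (spacedW j))
              = ' ' :: pyJoin [' '] ((w :: ws).map (spacedW j)) := by
            simp [pyJoin, spacedW]
          rw [e2] at ih
          rw [e1]
          have : bGo j (c :: ' ' :: t) = c :: bGo j (' ' :: t) := by
            simp [bGo]
          rw [this, ← ih]
        · -- c ≠ ' ', d ≠ ' '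
          obtain ⟨u, us, hu⟩ : ∃ u us, pySplitSpace t = u :: us := by
            cases h : pySplitSpace t with
            | nil => exact absurd h (pySplitSpace_ne_nil t)
            | cons u us => exact ⟨u, us, rfl⟩
          have hsd : pySplitSpace (d :: t) = (d :: u) :: us := by
            simp [pySplitSpace, hd, hu]
          have hsc : pySplitSpace (c :: d :: t) = (c :: d :: u) :: us := by
            simp [pySplitSpace, hc, hd, hu]
          rw [hsd] at ih
          rw [hsc]
          have e1 : pyJoin [' '] (((c :: d :: u) :: us).map (spacedW j))
              = (c :: j) ++ pyJoin [' '] (((d :: u) :: us).map (spacedW j)) := by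
            simp only [List.map_cons]
            rw [spacedW_eq_join, spacedW_eq_join j (d :: u),
                join_map_cons j c (d :: u) (by simp)]
            have : (c :: (j ++ pyJoin j ((d :: u).map (fun c => [c]))))
                = (c :: j) ++ pyJoin j ((d :: u).map (fun c => [c])) := by simp
            rw [this, pyJoin_cons_append]
          rw [e1, ih]
          simp [bGo, hc, hd]

-- ===== VERDICT (by name: the statement is the Claim_ definition above) =====
theorem apply_letter_spacing_py_spec : Claim_equal_apply_letter_spacing_py := by
  intro text spacing _
  unfold Spec_apply_letter_spacing_py apply_letter_spacing_py apply_letter_spacing_py_alt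
  by_cases h : spacing ≤ 0
  · simp [h]
  · simp only [h, if_false]
    congr 1
    rw [foldl_append_map]
    simp only [List.nil_append]
    exact main_lemma _ _
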